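-- pv_equiv track=rewrite | github.com/Sriharivignesh/codePractice | Python/google2.py | answer
-- ===== SOURCE A (Python) =====
-- def answer(total_lambs):
--     # your code here
--         fib_reference = [1,1,2,3,5,8,13,21,34,55,89,144,233,377,610,987,1597,2584,4181,6765,10946,17711,28657,46368,75025,121393,196418,317811,514229,832040,1346269,2178309,3524578,5702887,9227465,14930352,24157817,39088169,63245986,102334155,165580141,267914296,433494437,701408733]
--         squares_reference = [1,2,4,8,16,32,64,128,256,512,1024,2048,4096,8192,16384,32768,65536,131072,262144,524288,1048576,2097152,4194304,8388608,16777216,33554432,67108864,134217728,268435456,536870912]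
--         stingy = 0
--         generous = 0
--         tsum = 0
--         for i in fib_reference:
--             if(tsum > total_lambs):
--                 break
--             tsum += i
--             stingy += 1
--
--         tsum = 0
--         for i in squares_reference:
--             if(tsum > total_lambs):
--                 break
--             tsum += i
--             generous += 1
--
--         return (stingy - generous)
-- ===== SOURCE B (Python) =====
-- def answer(total_lambs):
--     fib_reference = [1,1,2,3,5,8,13,21,34,55,89,144,233,377,610,987,1597,2584,4181,6765,10946,17711,28657,46368,75025,121393,196418,317811,514229,832040,1346269,2178309,3524578,5702887,9227465,14930352,24157817,39088169,63245986,102334155,165580141,267914296,433494437,701408733]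
--     squares_reference = [1,2,4,8,16,32,64,128,256,512,1024,2048,4096,8192,16384,32768,65536,131072,262144,524288,1048576,2097152,4194304,8388608,16777216,33554432,67108864,134217728,268435456,536870912]
--
--     def count_fitting(terms):
--         # prefix sums with a leading 0; prefix[k] = sum of the first k terms
--         prefix = [0]
--         for t in terms[:-1]:
--             prefix.append(prefix[-1] + t)
--         # binary search: number of prefix sums <= total_lambs
--         lo, hi = 0, len(prefix)
--         while lo < hi:
--             mid = (lo + hi) // 2
--             if prefix[mid] <= total_lambs:
--                 lo = mid + 1
--             else:
--                 hi = mid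
--         return lo
--
--     return count_fitting(fib_reference) - count_fitting(squares_reference)
-- ===== Notes on version B (the rewrite author's own statement) =====
-- stated objective: alternative
-- what changed: Replaced the two accumulate-and-break loops by prefix-sum tables with a leading 0 and a hand-written binary search that counts the prefix sums <= total_lambs, returning the difference of the two counts.
import Mathlib
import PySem

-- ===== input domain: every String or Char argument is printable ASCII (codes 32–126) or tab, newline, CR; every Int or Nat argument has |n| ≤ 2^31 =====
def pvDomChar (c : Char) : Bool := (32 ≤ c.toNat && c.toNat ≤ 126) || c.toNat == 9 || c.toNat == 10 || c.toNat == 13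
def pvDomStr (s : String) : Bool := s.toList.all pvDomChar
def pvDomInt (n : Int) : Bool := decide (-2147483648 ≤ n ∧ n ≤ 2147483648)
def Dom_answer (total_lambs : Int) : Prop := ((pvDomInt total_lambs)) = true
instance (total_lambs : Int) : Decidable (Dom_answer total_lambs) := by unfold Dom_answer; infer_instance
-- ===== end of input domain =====

-- B replaces the two accumulating break-loops by prefix-sum tables (leading 0) and a
-- hand-written binary search counting the prefix sums ≤ total_lambs (objective: alternative).

-- ===== PORT A =====
-- the for-loop with break: count += 1 for each term while the running sum stays ≤ total
def answerLoop (total : Int) : List Int → Int → Int → Int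
  | [], _tsum, count => count
  | i :: rest, tsum, count =>
    if tsum > total then count else answerLoop total rest (tsum + i) (count + 1)

def answer (total_lambs : Int) : Int :=
  let fib_reference : List Int := [1,1,2,3,5,8,13,21,34,55,89,144,233,377,610,987,1597,2584,4181,6765,10946,17711,28657,46368,75025,121393,196418,317811,514229,832040,1346269,2178309,3524578,5702887,9227465,14930352,24157817,39088169,63245986,102334155,165580141,267914296,433494437,701408733]
  let squares_reference : List Int := [1,2,4,8,16,32,64,128,256,512,1024,2048,4096,8192,16384,32768,65536,131072,262144,524288,1048576,2097152,4194304,8388608,16777216,33554432,67108864,134217728,268435456,536870912]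
  let stingy := answerLoop total_lambs fib_reference 0 0
  let generous := answerLoop total_lambs squares_reference 0 0
  stingy - generous

-- ===== PORT B =====
-- prefix = [0]; for t in terms[:-1]: prefix.append(prefix[-1] + t)
def buildPrefix (terms : List Int) : List Int :=
  terms.dropLast.foldl (fun pre t => pre ++ [pre.getLast?.getD 0 + t]) [0]

-- the while-loop binary search of Source B
def bsearchCount (pre : List Int) (total : Int) (lo hi : Nat) : Nat :=
  if _h : lo < hi then
    if pre.getD ((lo + hi) / 2) 0 ≤ total then bsearchCount pre total ((lo + hi) / 2 + 1) hi
    else bsearchCount pre total lo ((lo + hi) / 2)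
  else lo
termination_by hi - lo
decreasing_by all_goals omega

def countFitting (total_lambs : Int) (terms : List Int) : Nat :=
  let pre := buildPrefix terms
  bsearchCount pre total_lambs 0 pre.length

def answer_alt (total_lambs : Int) : Int :=
  let fib_reference : List Int := [1,1,2,3,5,8,13,21,34,55,89,144,233,377,610,987,1597,2584,4181,6765,10946,17711,28657,46368,75025,121393,196418,317811,514229,832040,1346269,2178309,3524578,5702887,9227465,14930352,24157817,39088169,63245986,102334155,165580141,267914296,433494437,701408733]
  let squares_reference : List Int := [1,2,4,8,16,32,64,128,256,512,1024,2048,4096,8192,16384,32768,65536,131072,262144,524288,1048576,2097152,4194304,8388608,16777216,33554432,67108864,134217728,268435456,536870912]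
  (countFitting total_lambs fib_reference : Int) - (countFitting total_lambs squares_reference : Int)

-- ===== PRECONDITION & SPEC =====
def Spec_answer (total_lambs : Int) (out : Int) : Prop := out = answer_alt total_lambs
instance (total_lambs : Int) (out : Int) : Decidable (Spec_answer total_lambs out) := by unfold Spec_answer; infer_instance

-- ===== CLAIM (what is proved, stated in full; the proofs are below) =====
def Claim_equal_answer : Prop := ∀ (total_lambs : Int), Dom_answer total_lambs → Spec_answer total_lambs (answer total_lambs)

-- ===== LEMMAS AND PROOFS =====

-- the list of partial sums tsum, tsum+l0, tsum+l0+l1, … (one per element of l)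
def prefList : List Int → Int → List Int
  | [], _ => []
  | i :: r, t => t :: prefList r (t + i)

lemma prefList_ge (l : List Int) (t : Int) (hpos : ∀ x ∈ l, 0 < x) :
    ∀ p ∈ prefList l t, t ≤ p := by
  induction l generalizing t with
  | nil => simp [prefList]
  | cons i r ih =>
    intro p hp
    simp only [prefList, List.mem_cons] at hp
    rcases hp with rfl | hp
    · exact le_refl _
    · have hi : 0 < i := hpos i (by simp)
      have := ih (t + i) (fun x hx => hpos x (by simp [hx])) p hp
      omega

lemma loop_eq_countP (total : Int) (l : List Int) (tsum count : Int)
    (hpos : ∀ x ∈ l, 0 < x) :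
    answerLoop total l tsum count
      = count + ((prefList l tsum).countP (fun p => decide (p ≤ total)) : Int) := by
  induction l generalizing tsum count with
  | nil => simp [answerLoop, prefList]
  | cons i r ih =>
    by_cases h : tsum > total
    · have hz : (prefList (i :: r) tsum).countP (fun p => decide (p ≤ total)) = 0 := by
        apply List.countP_eq_zero.mpr
        intro p hp
        have := prefList_ge (i :: r) tsum hpos p hp
        simp
        omega
      simp [answerLoop, h, hz]
    · have hr : ∀ x ∈ r, 0 < x := fun x hx => hpos x (by simp [hx])
      have := ih (tsum + i) (count + 1) hr
      simp only [answerLoop, if_neg h, prefList, List.countP_cons]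
      simp only [this]
      have : decide (tsum ≤ total) = true := by simp; omega
      rw [this]
      simp
      omega

lemma countP_eq_of_split (xs : List Int) (p : Int → Bool) (n : Nat) (hn : n ≤ xs.length)
    (h1 : ∀ (k : Nat) (h : k < xs.length), k < n → p xs[k])
    (h2 : ∀ (k : Nat) (h : k < xs.length), n ≤ k → ¬ p xs[k] = true) :
    xs.countP p = n := by
  induction xs generalizing n with
  | nil => simp only [List.countP_nil]; simp at hn; omega
  | cons x xs ih =>
    cases n with
    | zero =>
      rw [List.countP_cons]
      have hx : ¬ p x = true := h2 0 (by simp) (by omega)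
      have := ih 0 (by omega)
        (fun k h hk => by omega)
        (fun k h hk => h2 (k + 1) (by simpa using Nat.succ_lt_succ h) (by omega))
      simp [this, hx]
    | succ m =>
      rw [List.countP_cons]
      have hx : p x = true := by
        have := h1 0 (by simp) (by omega)
        simpa using this
      have := ih m (by simpa using hn)
        (fun k h hk => by
          have := h1 (k + 1) (by simpa using Nat.succ_lt_succ h) (by omega)
          simpa using this)
        (fun k h hk => by
          have := h2 (k + 1) (by simpa using Nat.succ_lt_succ h) (by omega)
          simpa using this)
      simp [this, hx]

lemma bsearch_eq (pre : List Int) (total : Int)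
    (hmono : ∀ (i j : Nat) (hi : i < pre.length) (hj : j < pre.length),
      i ≤ j → pre[i] ≤ pre[j]) :
    ∀ (n lo hi : Nat), hi - lo ≤ n → hi ≤ pre.length → lo ≤ hi →
    (∀ (k : Nat) (h : k < pre.length), k < lo → pre[k] ≤ total) →
    (∀ (k : Nat) (h : k < pre.length), hi ≤ k → total < pre[k]) →
    bsearchCount pre total lo hi = pre.countP (fun p => decide (p ≤ total)) := by
  intro n
  induction n with
  | zero =>
    intro lo hi hd hlen hle h1 h2
    have : hi = lo := by omega
    subst this
    rw [bsearchCount, dif_neg (by omega)]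
    exact (countP_eq_of_split pre _ hi (by omega)
      (fun k h hk => by simpa using h1 k h hk)
      (fun k h hk => by simp; exact h2 k h hk)).symm
  | succ m ih =>
    intro lo hi hd hlen hle h1 h2
    by_cases h : lo < hi
    · rw [bsearchCount, dif_pos h]
      have hmid : (lo + hi) / 2 < pre.length := by omega
      rw [List.getD_eq_getElem pre 0 hmid]
      by_cases hc : pre[(lo + hi) / 2] ≤ total
      · rw [if_pos hc]
        apply ih ((lo + hi) / 2 + 1) hi (by omega) hlen (by omega)
        · intro k hk hklt
          by_cases hkl : k < lo
          · exact h1 k hk hkl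
          · exact le_trans (hmono k ((lo + hi) / 2) hk hmid (by omega)) hc
        · exact h2
      · rw [if_neg hc]
        apply ih lo ((lo + hi) / 2) (by omega) (by omega) (by omega) h1
        intro k hk hkge
        by_cases hkh : hi ≤ k
        · exact h2 k hk hkh
        · exact lt_of_lt_of_le (by omega) (hmono ((lo + hi) / 2) k hmid hk hkge)
    · rw [bsearchCount, dif_neg h]
      have : hi = lo := by omega
      subst this
      exact (countP_eq_of_split pre _ hi (by omega)
        (fun k hk hkl => by simpa using h1 k hk hkl)
        (fun k hk hkg => by simp; exact h2 k hk hkg)).symm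

lemma pairwise_getElem_le {l : List Int} (hp : l.Pairwise (· ≤ ·)) :
    ∀ (i j : Nat) (hi : i < l.length) (hj : j < l.length), i ≤ j → l[i] ≤ l[j] := by
  intro i j hi hj hij
  rcases Nat.lt_or_ge i j with hlt | hge
  · exact List.pairwise_iff_getElem.mp hp i j hi hj hlt
  · have : i = j := by omega
    subst this
    exact le_refl _

-- the two concrete term lists (same literals as in the ports), for the glue lemmas
def fibL : List Int := [1,1,2,3,5,8,13,21,34,55,89,144,233,377,610,987,1597,2584,4181,6765,10946,17711,28657,46368,75025,121393,196418,317811,514229,832040,1346269,2178309,3524578,5702887,9227465,14930352,24157817,39088169,63245986,102334155,165580141,267914296,433494437,701408733]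
def sqL : List Int := [1,2,4,8,16,32,64,128,256,512,1024,2048,4096,8192,16384,32768,65536,131072,262144,524288,1048576,2097152,4194304,8388608,16777216,33554432,67108864,134217728,268435456,536870912]

lemma count_eq (total : Int) (terms : List Int)
    (hpref : buildPrefix terms = prefList terms 0)
    (hpw : (prefList terms 0).Pairwise (· ≤ ·))
    (hpos : ∀ x ∈ terms, 0 < x) :
    (countFitting total terms : Int) = answerLoop total terms 0 0 := by
  rw [loop_eq_countP total terms 0 0 hpos]
  show ((bsearchCount (buildPrefix terms) total 0 (buildPrefix terms).length : Nat) : Int) = _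
  rw [hpref]
  rw [bsearch_eq (prefList terms 0) total (pairwise_getElem_le hpw)
    (prefList terms 0).length 0 (prefList terms 0).length
    (le_refl _) (le_refl _) (Nat.zero_le _)
    (fun k h hk => absurd hk (by omega))
    (fun k h hk => absurd h (by omega))]
  simp

-- ===== VERDICT (by name: the statement is the Claim_ definition above) =====
theorem answer_spec : Claim_equal_answer := by
  intro total _hdom
  unfold Spec_answer
  have hf := count_eq total fibL (by decide) (by decide) (by decide)
  have hs := count_eq total sqL (by decide) (by decide) (by decide)
  simp only [fibL] at hf
  simp only [sqL] at hs
  show answer total = answer_alt total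
  simp only [answer, answer_alt]
  rw [← hf, ← hs]
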